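-- pv_equiv track=rewrite | github.com/hjkim977/Coding-Test | 프로그래머스/1/86491. 최소직사각형/최소직사각형.py | solution
-- ===== SOURCE A (Python) =====
-- def solution(sizes):
--     r=[] #가로
--     c=[] #세로
--     for w,h in sizes:
--         if w>=h:
--             r.append(w)
--             c.append(h)
--         else:
--             r.append(h)
--             c.append(w)
--     return max(r)*max(c)
-- ===== SOURCE B (Python) =====
-- def solution(sizes):
--     # Divide-and-conquer: the bounding rectangle (long side, short side) of a
--     # group of cards is the componentwise max of the bounding rectangles of its
--     # halves; a single card is normalized to (long, short).
--     def bound(lst):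
--         if len(lst) == 1:
--             w, h = lst[0]
--             return (w, h) if w >= h else (h, w)
--         mid = len(lst) // 2
--         l1, s1 = bound(lst[:mid])
--         l2, s2 = bound(lst[mid:])
--         return (l1 if l1 > l2 else l2, s1 if s1 > s2 else s2)
--     l, s = bound(sizes)
--     return l * s
-- ===== Notes on version B (the rewrite author's own statement) =====
-- stated objective: alternative
-- what changed: Replaces A's single classification loop over two parallel lists (then max of each) with a recursive divide-and-conquer that splits the card list in halves and merges bounding rectangles (long, short) by componentwise max, multiplying at the top.
import Mathlib
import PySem

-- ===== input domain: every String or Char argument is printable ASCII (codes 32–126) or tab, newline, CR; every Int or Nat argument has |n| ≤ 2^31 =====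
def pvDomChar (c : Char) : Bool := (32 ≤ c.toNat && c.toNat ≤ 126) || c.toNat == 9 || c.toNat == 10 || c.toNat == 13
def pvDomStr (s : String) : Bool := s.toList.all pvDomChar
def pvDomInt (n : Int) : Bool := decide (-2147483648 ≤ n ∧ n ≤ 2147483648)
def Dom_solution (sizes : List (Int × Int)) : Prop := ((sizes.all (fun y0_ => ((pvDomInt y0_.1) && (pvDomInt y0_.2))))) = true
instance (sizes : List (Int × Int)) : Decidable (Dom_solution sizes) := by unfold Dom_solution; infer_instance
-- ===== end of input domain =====

-- B replaces A's classification loop with a divide-and-conquer recursion that splits the list in halves and merges bounding rectangles componentwise (alternative decomposition; same result).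


-- ===== PORT A =====
-- loop: for w,h in sizes: classify into r (long) / c (short) by the w≥h branch, appending at the back
def solution (sizes : List (Int × Int)) : Int :=
  let rc := sizes.foldl
    (fun (rc : List Int × List Int) p =>
      if p.1 ≥ p.2 then (rc.1 ++ [p.1], rc.2 ++ [p.2])
      else (rc.1 ++ [p.2], rc.2 ++ [p.1]))
    ([], [])
  -- max(r)*max(c); Python raises ValueError on empty lists, excluded by Pre_ (max? = none there)
  ((PySem.List.max? rc.1 (fun x => x)).getD 0) * ((PySem.List.max? rc.2 (fun x => x)).getD 0)

-- ===== PORT B =====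
-- bound(lst): len==1 → normalized single card; else split at mid = len//2, recurse on the
-- two slices (lst[:mid]/lst[mid:] with 0 ≤ mid ≤ len are exactly take/drop), merge componentwise.
-- Python recurses forever on []; that input is outside Pre_, the port returns a dummy there.
def boundAlt (lst : List (Int × Int)) : Int × Int :=
  if _h1 : lst.length = 1 then
    match lst with
    | p :: _ => if p.1 ≥ p.2 then (p.1, p.2) else (p.2, p.1)
    | [] => (0, 0)
  else if _h0 : lst.length = 0 then (0, 0)
  else
    let mid := lst.length / 2
    let r1 := boundAlt (lst.take mid)
    let r2 := boundAlt (lst.drop mid)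
    (if r1.1 > r2.1 then r1.1 else r2.1, if r1.2 > r2.2 then r1.2 else r2.2)
termination_by lst.length
decreasing_by
  · simp only [List.length_take]; omega
  · simp only [List.length_drop]; omega

def solution_alt (sizes : List (Int × Int)) : Int :=
  let ls := boundAlt sizes
  ls.1 * ls.2

-- ===== PRECONDITION & SPEC =====
-- Pre_ excludes only the empty list, where both A and B raise (ValueError / RecursionError).
def Pre_solution (sizes : List (Int × Int)) : Prop := sizes ≠ []
instance (sizes : List (Int × Int)) : Decidable (Pre_solution sizes) := by unfold Pre_solution; infer_instance
def pvWitness_solution : (List (Int × Int)) := [(1, 2)]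

def Spec_solution (sizes : List (Int × Int)) (out : Int) : Prop := out = solution_alt sizes
instance (sizes : List (Int × Int)) (out : Int) : Decidable (Spec_solution sizes out) := by unfold Spec_solution; infer_instance

-- ===== CLAIM =====
def Claim_equal_solution : Prop := ∀ (sizes : List (Int × Int)), Dom_solution sizes → Pre_solution sizes → Spec_solution sizes (solution sizes)

-- ===== LEMMAS AND PROOFS =====
-- max of a nonempty list as Python's max computes it (0 for [] is a dummy, never used)
def listMax : List Int → Int
  | [] => 0
  | x :: t => t.foldl max x

lemma foldl_max_pull (u : List Int) (m y : Int) :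
    u.foldl max (max m y) = max m (u.foldl max y) := by
  induction u generalizing y with
  | nil => simp
  | cons z u ih => simpa [List.foldl, max_assoc] using ih (max y z)

lemma listMax_append (a b : List Int) (ha : a ≠ []) (hb : b ≠ []) :
    listMax (a ++ b) = max (listMax a) (listMax b) := by
  match a, b with
  | x :: t, y :: u =>
    simp only [listMax, List.cons_append, List.foldl_append, List.foldl_cons]
    rw [foldl_max_pull]

lemma if_gt_eq_max (a b : Int) : (if a > b then a else b) = max a b := by
  by_cases h : a > b
  · simp [h, max_eq_left (le_of_lt h)]
  · simp [h, max_eq_right (le_of_not_gt h)]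

-- A's classification loop produces exactly the per-card long sides and short sides, appended after the accumulator.
lemma solution_loop_eq (sizes : List (Int × Int)) : ∀ (acc : List Int × List Int),
    sizes.foldl
      (fun (rc : List Int × List Int) p =>
        if p.1 ≥ p.2 then (rc.1 ++ [p.1], rc.2 ++ [p.2])
        else (rc.1 ++ [p.2], rc.2 ++ [p.1]))
      acc
    = (acc.1 ++ sizes.map (fun p => max p.1 p.2), acc.2 ++ sizes.map (fun p => min p.1 p.2)) := by
  induction sizes with
  | nil => intro acc; simp
  | cons p t ih =>
    intro acc
    simp only [List.foldl_cons, List.map_cons]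
    by_cases h : p.1 ≥ p.2
    · rw [if_pos h, ih]
      simp [max_eq_left h, min_eq_right h]
    · rw [if_neg h, ih]
      have h' : p.1 ≤ p.2 := le_of_not_ge h
      simp [max_eq_right h', min_eq_left h']

-- B's divide-and-conquer computes exactly (max long side, max short side).
lemma bound_eq : ∀ (n : Nat) (lst : List (Int × Int)), lst.length = n → lst ≠ [] →
    boundAlt lst = (listMax (lst.map fun p => max p.1 p.2),
                    listMax (lst.map fun p => min p.1 p.2)) := by
  intro n
  induction n using Nat.strong_induction_on with
  | _ n ih =>
    intro lst hlen hne
    subst hlen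
    rw [boundAlt]
    by_cases h1 : lst.length = 1
    · match lst, h1 with
      | [p], _ =>
        simp only [List.length_cons, List.length_nil, dif_pos]
        by_cases h : p.1 ≥ p.2
        · simp [listMax, h]
        · have h' : p.1 ≤ p.2 := le_of_not_ge h
          simp [listMax, h, max_eq_right h', min_eq_left h']
    · have h0 : lst.length ≠ 0 := by simpa using hne
      rw [dif_neg h1, dif_neg h0]
      have hlen2 : 2 ≤ lst.length := by omega
      set mid := lst.length / 2 with hmid
      have hmid1 : 1 ≤ mid := by omega
      have hmidlt : mid < lst.length := by omega
      have htne : lst.take mid ≠ [] := by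
        intro h; have := congrArg List.length h
        simp only [List.length_take, List.length_nil] at this; omega
      have hdne : lst.drop mid ≠ [] := by
        intro h; have := congrArg List.length h
        simp only [List.length_drop, List.length_nil] at this; omega
      have hlt1 : (lst.take mid).length < lst.length := by
        rw [List.length_take]; omega
      have hlt2 : (lst.drop mid).length < lst.length := by
        rw [List.length_drop]; omega
      have ht := ih (lst.take mid).length hlt1 (lst.take mid) rfl htne
      have hd := ih (lst.drop mid).length hlt2 (lst.drop mid) rfl hdne
      simp only [ht, hd, if_gt_eq_max]
      have hsplit : lst = lst.take mid ++ lst.drop mid := (List.take_append_drop mid lst).symm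
      rw [Prod.mk.injEq]
      constructor <;>
      · conv_rhs => rw [hsplit]
        rw [List.map_append, listMax_append _ _ (by simpa using htne) (by simpa using hdne)]

-- Python's max(xs) on nonempty xs is listMax
lemma max?_getD_eq (xs : List Int) (h : xs ≠ []) :
    (PySem.List.max? xs (fun x => x)).getD 0 = listMax xs := by
  match xs with
  | x :: t => rw [PySem.List.max?_id_cons]; rfl

-- ===== VERDICT =====
theorem solution_spec : Claim_equal_solution := by
  intro sizes _ hpre
  unfold Spec_solution solution solution_alt
  rw [solution_loop_eq]
  have hm : (sizes.map fun p => max p.1 p.2) ≠ [] := by simpa using hpre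
  have hn : (sizes.map fun p => min p.1 p.2) ≠ [] := by simpa using hpre
  simp only [List.nil_append]
  rw [max?_getD_eq _ hm, max?_getD_eq _ hn,
    bound_eq sizes.length sizes rfl hpre]
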